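-- pv_equiv track=rewrite | github.com/Jesus-Pons/reversi | backend/app/ai/heuristics.py | evaluate_end_game
-- ===== SOURCE A (Python) =====
-- def evaluate_end_game(board, player_id):
--     """Evaluación definitiva para fin de partida (cuenta fichas reales)."""
--     my_count = sum(row.count(player_id) for row in board)
--     op_count = sum(row.count(3 - player_id) for row in board)
--     if my_count > op_count:
--         return 10000 + (my_count - op_count)
--     elif my_count < op_count:
--         return -10000 - (op_count - my_count)
--     return 0
-- ===== SOURCE B (Python) =====
-- def evaluate_end_game(board, player_id):
--     """Single pass keeping only a signed running difference; no counts are ever materialised."""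
--     opp = 3 - player_id
--     diff = 0
--     for row in board:
--         for cell in row:
--             if cell == player_id:
--                 diff += 1
--             elif cell == opp:
--                 diff -= 1
--     if diff > 0:
--         return 10000 + diff
--     if diff < 0:
--         return -10000 + diff
--     return 0
-- ===== Notes on version B (the rewrite author's own statement) =====
-- stated objective: simpler
-- what changed: Instead of computing two separate piece counts by staged .count scans, B makes one pass over the cells maintaining a single signed accumulator (+1 for own piece, -1 for opponent) and branches on its sign.
import Mathlib
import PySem

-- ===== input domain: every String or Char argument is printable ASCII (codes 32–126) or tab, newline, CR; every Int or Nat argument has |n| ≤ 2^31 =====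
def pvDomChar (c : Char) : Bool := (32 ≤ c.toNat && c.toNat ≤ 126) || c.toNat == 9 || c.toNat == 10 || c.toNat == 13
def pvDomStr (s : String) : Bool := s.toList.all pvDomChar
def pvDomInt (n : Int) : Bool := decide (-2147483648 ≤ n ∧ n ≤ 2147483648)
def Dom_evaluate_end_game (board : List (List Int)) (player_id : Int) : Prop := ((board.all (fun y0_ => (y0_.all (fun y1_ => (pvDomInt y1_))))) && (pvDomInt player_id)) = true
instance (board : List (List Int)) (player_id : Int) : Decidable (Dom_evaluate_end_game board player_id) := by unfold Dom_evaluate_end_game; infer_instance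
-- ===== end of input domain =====

-- B (simpler): one pass with a single signed accumulator (+1/-1 per cell) replaces A's two staged count scans; same value everywhere.


-- ===== PORT A =====
def evaluate_end_game (board : List (List Int)) (player_id : Int) : Int :=
  let my_count : Int := (board.map (fun row => (PySem.List.count row player_id : Int))).sum
  let op_count : Int := (board.map (fun row => (PySem.List.count row (3 - player_id) : Int))).sum
  if my_count > op_count then 10000 + (my_count - op_count)
  else if my_count < op_count then -10000 - (op_count - my_count)
  else 0

-- ===== PORT B =====
def evaluate_end_game_alt (board : List (List Int)) (player_id : Int) : Int :=
  let opp := 3 - player_id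
  let diff := board.foldl (fun d row =>
    row.foldl (fun d cell =>
      if cell = player_id then d + 1 else if cell = opp then d - 1 else d) d) 0
  if diff > 0 then 10000 + diff
  else if diff < 0 then -10000 + diff
  else 0

-- ===== PRECONDITION & SPEC =====
def Spec_evaluate_end_game (board : List (List Int)) (player_id : Int) (out : Int) : Prop := out = evaluate_end_game_alt board player_id
instance (board : List (List Int)) (player_id : Int) (out : Int) : Decidable (Spec_evaluate_end_game board player_id out) := by unfold Spec_evaluate_end_game; infer_instance

-- ===== CLAIM (what is proved, stated in full; the proofs are below) =====
def Claim_equal_evaluate_end_game : Prop := ∀ (board : List (List Int)) (player_id : Int), Dom_evaluate_end_game board player_id → Spec_evaluate_end_game board player_id (evaluate_end_game board player_id)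

-- ===== LEMMAS AND PROOFS =====

-- ===== VERDICT (by name: the statement is the Claim_ definition above) =====
theorem diff_foldl_row (row : List Int) (p q d : Int) (hpq : p ≠ q) :
    row.foldl (fun d cell => if cell = p then d + 1 else if cell = q then d - 1 else d) d
      = d + (PySem.List.count row p : Int) - (PySem.List.count row q : Int) := by
  induction row generalizing d with
  | nil => simp [PySem.List.count]
  | cons c cs ih =>
      simp only [List.foldl_cons, PySem.List.count, List.count_cons, beq_iff_eq]
      by_cases h1 : c = p <;> by_cases h2 : c = q <;>
        simp [h1, h2, ih] <;> ((try split_ifs) <;> push_cast <;> simp_all <;> omega)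

theorem diff_foldl_board (board : List (List Int)) (p q d : Int) (hpq : p ≠ q) :
    board.foldl (fun d row =>
        row.foldl (fun d cell => if cell = p then d + 1 else if cell = q then d - 1 else d) d) d
      = d + (board.map (fun row => (PySem.List.count row p : Int))).sum
          - (board.map (fun row => (PySem.List.count row q : Int))).sum := by
  induction board generalizing d with
  | nil => simp
  | cons r rs ih =>
      rw [List.foldl_cons, ih, diff_foldl_row _ _ _ _ hpq, List.map_cons, List.map_cons,
        List.sum_cons, List.sum_cons]
      ring

theorem evaluate_end_game_spec : Claim_equal_evaluate_end_game := by
  intro board player_id _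
  unfold Spec_evaluate_end_game evaluate_end_game evaluate_end_game_alt
  simp only []
  rw [diff_foldl_board board player_id (3 - player_id) 0 (by omega)]
  omega
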